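/- GENERATED by mk_final_copies.py from the proof of the farm's unit `compute_sorted_huffman.2` (farm:compute_sorted_huffman.2.1: Lemmas.lean) as the
   re-elaboration sweep compiled it — do not edit. -/
import Vorbis.Spec.Codebook.SortedHuffman
import Vorbis.Spec.Leaves2
import Vorbis.Spec.LibcSort

open X86 X86.User Asan Vorbis Vorbis.Spec

namespace Vorbis.Spec.compute_sorted_huffman_2

/-- `uint32_compare` is a comparison function for qsort's records of 4 bytes: the premise of qsort's contract at the call of
segment .2 (`CmpSpec.of_calls` with the function's own contract). -/
theorem cmp_ok {Lay : Layout} {μ : Microarch} {u₀ : State} (others : List Obj) (frames : List (Nat × FrameLayout))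
    (h : Calls Lay μ WayInv (conv u₀) L.uint32_compare.entry (uint32_compare.spec others frames)) :
    CmpSpec Lay μ u₀ others frames L.uint32_compare.entry 4 := by
  refine CmpSpec.of_calls (by decide) h ?_ ?_ ?_ ?_
  · intro u hu
    exact hu
  · intro u v _ hp
    exact hp.1
  · exact Nat.le_refl _
  · intro u
    rfl

/-- What the precondition's `Apart` list says about the `sorted_codewords` block `[sc, sc + 4(se + 1))`, as arithmetic: it meets
neither the struct `*c`, nor the `sorted_values` block, nor `lengths[0 .. entries)`, nor (sparse) `values[0 .. se)`. -/
theorem sc_apart {others : List Obj} {frames : List (Nat × FrameLayout)} {Blk : Block → Prop} {e : State}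
    (hpre : SortedHuffmanPre others frames Blk e) :
    (scBlock e.mem (e.reg .rdi).toNat).disjoint (Codebook.block (e.reg .rdi).toNat) ∧
    (scBlock e.mem (e.reg .rdi).toNat).disjoint (Codebook.svBlock e.mem (e.reg .rdi).toNat) ∧
    (scBlock e.mem (e.reg .rdi).toNat).disjoint
      ⟨(e.reg .rsi).toNat, (Codebook.entries e.mem (e.reg .rdi).toNat).toNat⟩ ∧
    (Codebook.sparse e.mem (e.reg .rdi).toNat ≠ 0 →
      (scBlock e.mem (e.reg .rdi).toNat).disjoint
        ⟨(e.reg .rdx).toNat, 4 * (Codebook.sorted_entries e.mem (e.reg .rdi).toNat).toNat⟩) := by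
  by_cases hs : Codebook.sparse e.mem (e.reg .rdi).toNat = 0
  · have ha := hpre.apartDense hs
    obtain ⟨hl, _⟩ := hpre.dense hs
    simp only [Apart, List.pairwise_cons, List.mem_cons, List.not_mem_nil, or_false, forall_eq_or_imp, forall_eq,
      Codebook.clBlock, Codebook.N_dense hs] at ha
    obtain ⟨⟨_, _, h1, _⟩, ⟨_, h2, _⟩, _, h3, _⟩ := ha
    refine ⟨h1.symm, h3, ?_, fun h => absurd hs h⟩
    rw [hl]
    exact h2.symm
  · have ha := hpre.apartSparse hs
    simp only [Apart, List.pairwise_cons, List.mem_cons, List.not_mem_nil, or_false, forall_eq_or_imp, forall_eq] at ha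
    obtain ⟨⟨_, _, h1, _⟩, _, _, ⟨h3, h4, h5⟩, _⟩ := ha
    exact ⟨h1.symm, h3, h4, fun _ => h5⟩

/-- **A check of a field of `*c`** (`k` bytes at offset `off` of the struct; the check is called with `b` = `c + off`): the struct
lies inside one live object (`bookLive`), and no store since the function's entry went to the shadow (`hun`: up to the segment's
entry, from the assertion; `hun2`: since then, `by v_untouched`). -/
theorem check_field {others : List Obj} {frames : List (Nat × FrameLayout)} {Blk : Block → Prop} {e : State}
    (hpre : SortedHuffmanPre others frames Blk e) {m m' : Mem} (hun : ShadowUntouched e.mem m) (hun2 : ShadowUntouched m m')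
    (b : Word) (k off : Nat) (hk : 1 ≤ k) (hoff : off + k ≤ 2120) (hb : b.toNat = (e.reg .rdi).toNat + off) :
    AccSmall k m' b := by
  have hun' : ShadowUntouched e.mem m' := Mem.EqOn.trans hun hun2
  refine hpre.bookLive.accSmall hpre.shadow.inv hun' b k hk (by omega) ?_
  simp only [Vorbis.Off.sizeof.Codebook]
  omega

/-- **The check of the sentinel store** `c->sorted_codewords[se] = 0xffffffff` (0x10b386): the last word of the block of
`4(se + 1)` bytes (K4). -/
theorem check_sentinel {others : List Obj} {frames : List (Nat × FrameLayout)} {Blk : Block → Prop} {e : State}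
    (hpre : SortedHuffmanPre others frames Blk e) {m m' : Mem} (hun : ShadowUntouched e.mem m) (hun2 : ShadowUntouched m m')
    (b : Word) (hb : b.toNat = Codebook.sorted_codewords e.mem (e.reg .rdi).toNat +
      4 * (Codebook.sorted_entries e.mem (e.reg .rdi).toNat).toNat) : AccSmall 4 m' b := by
  have hun' : ShadowUntouched e.mem m' := Mem.EqOn.trans hun hun2
  have hs : Site (Live (stackObjs frames ++ others)) (Codebook.sorted_codewords e.mem (e.reg .rdi).toNat +
      4 * (Codebook.sorted_entries e.mem (e.reg .rdi).toNat).toNat) 4 := by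
    refine Site.of_blk hpre.live (hpre.K4.sc hpre.se_pos) ?_ ?_ (by decide)
    · simp only []
      omega
    · simp only []
      omega
  exact check_site hpre.shadow.inv hun' hs hb

/-- The fields of `*c` read the same over two steps. -/
theorem sameFields_trans {m m' m'' : Mem} {c : Nat} (h1 : Codebook.SameFields m m' c) (h2 : Codebook.SameFields m' m'' c) :
    Codebook.SameFields m m'' c := by
  refine ⟨?_, ?_, ?_, ?_, ?_, ?_, ?_, ?_, ?_, ?_, ?_, ?_, ?_, ?_, ?_, ?_⟩
  · exact h2.dimensions.trans h1.dimensions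
  · exact h2.entries.trans h1.entries
  · exact h2.codeword_lengths.trans h1.codeword_lengths
  · exact h2.minimum_value.trans h1.minimum_value
  · exact h2.delta_value.trans h1.delta_value
  · exact h2.value_bits.trans h1.value_bits
  · exact h2.lookup_type.trans h1.lookup_type
  · exact h2.sequence_p.trans h1.sequence_p
  · exact h2.sparse.trans h1.sparse
  · exact h2.lookup_values.trans h1.lookup_values
  · exact h2.multiplicands.trans h1.multiplicands
  · exact h2.codewords.trans h1.codewords
  · intro k hk
    exact (h2.fast_huffman k hk).trans (h1.fast_huffman k hk)
  · exact h2.sorted_codewords.trans h1.sorted_codewords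
  · exact h2.sorted_values.trans h1.sorted_values
  · exact h2.sorted_entries.trans h1.sorted_entries

/-- Frame of K3t: the shape clauses speak of fields of the struct only. -/
theorem k3t_frame {Blk : Block → Prop} {m m' : Mem} {c : Nat} (h : Codebook.K3t Blk m c) (e : Codebook.SameFields m m' c) :
    Codebook.K3t Blk m' c := by
  refine ⟨?_, ?_, ?_⟩
  · rw [e.sparse]
    intro hs
    have k := h.dense hs
    refine ⟨?_, ?_⟩
    · rw [e.codeword_lengths, e.entries]
      exact k.lengths
    · rw [e.codewords, e.entries]
      exact k.codewords
  · rw [e.sparse, e.codeword_lengths, e.sorted_entries]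
    exact h.sparse_lengths
  · rw [e.sparse, e.codewords, e.sorted_entries]
    exact h.sparse_codewords

/-- **A block off the segment's footprint is kept**: the footprint of segment .2 is its stack below the spilled arguments
(`[rsp₀ − 336, rsp₀ − 88)`: the check calls' and qsort's frames, `i`), the slot of `len` and the `sorted_codewords` block; a block
`B` that lies in the data space off the stack below `rsp₀ + 8` and does not meet `sorted_codewords` reads the same. -/
theorem kept_of_footprint {m m' : Mem} {rsp sc k : Nat} {B : Block}
    (hS : Mem.SameExcept [⟨rsp - 336, rsp - 88⟩, ⟨rsp - 80, rsp - 76⟩, ⟨sc, sc + k⟩] m m')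
    (hw : B.base + B.size ≤ 0xC00000 ∧ (rsp + 8 ≤ B.base ∨ B.base + B.size ≤ 0x700000 ∨ 0x800000 ≤ B.base))
    (hroom : 0x700000 + 336 ≤ rsp) (htop : rsp + 8 ≤ 0x800000)
    (hd : Block.disjoint ⟨sc, k⟩ B) : B.Kept m m' := by
  simp only [Block.disjoint] at hd
  refine Block.Kept.of_sameExcept hS ?_ (by omega)
  intro w hw
  simp only [List.mem_cons, List.not_mem_nil, or_false] at hw
  rcases hw with rfl | rfl | rfl
  · simp only []
    omega
  · simp only []
    omega
  · simp only []
    omega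

/-- **`Common` again after segment .2's stores**: the memory of `v` differs from that of `u` (where `Common` holds) only inside
the segment's footprint — its stack below the spilled arguments, the slot of `len`, the `sorted_codewords` block —, rsp and rbp are
what they were, the text, DF / MXCSR and the shadow are kept. Every memory-dependent field of `Common` reads a block that the
precondition's `Apart` list separates from `sorted_codewords` and that `blk_where` puts off the stack. -/
theorem common_carry {others : List Obj} {frames : List (Nat × FrameLayout)} {Blk : Block → Prop} {u₀ : State} {ret : Word}
    {e u v : State} (h : SortedHuffman.Common others frames Blk u₀ ret e u)
    (hroom : 0x700000 + 336 ≤ (e.reg .rsp).toNat) (htop : (e.reg .rsp).toNat + 8 ≤ 0x800000)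
    (hS : Mem.SameExcept [⟨(e.reg .rsp).toNat - 336, (e.reg .rsp).toNat - 88⟩,
      ⟨(e.reg .rsp).toNat - 80, (e.reg .rsp).toNat - 76⟩,
      ⟨Codebook.sorted_codewords e.mem (e.reg .rdi).toNat, Codebook.sorted_codewords e.mem (e.reg .rdi).toNat +
        4 * ((Codebook.sorted_entries e.mem (e.reg .rdi).toNat).toNat + 1)⟩] u.mem v.mem)
    (hrsp : v.reg .rsp = e.reg .rsp - 104) (hrbp : v.reg .rbp = e.reg .rdi) (hcode : CodeOK u₀ v.mem) (hinv : abiInv v)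
    (hun : ShadowUntouched u.mem v.mem) :
    SortedHuffman.Common others frames Blk u₀ ret e v := by
  obtain ⟨hmid, hpre, hc, hlengths, hvalues, hfields, hK1, hK2, hK3t, hK4, hzv, hvals, hlens⟩ := h
  obtain ⟨he, _, hra, h15, h14, h13, h12, hbp, hbx, hsame, _, _, hun0⟩ := hmid
  have hsh := hpre.shadow
  have hse1 := hpre.se_pos
  have hse2 := hpre.K2.se_le
  have hent := hpre.K1.ent_lt
  obtain ⟨a1, a2, a3, a4⟩ := sc_apart hpre
  simp only [scBlock] at a1 a2 a3 a4
  -- where the blocks are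
  have hwc := hpre.bookLive.where_ hsh.inv hsh.offText (by decide)
  have hwsc := blk_where hpre.live hsh.inv hsh.offText (by omega) (hpre.K4.sc hse1) (by simp only; omega)
  have hwsv := blk_where hpre.live hsh.inv hsh.offText (by omega) (hpre.K4.sv hse1) (by simp only; omega)
  have hwl := blk_where hpre.live hsh.inv hsh.offText (by omega) hpre.lens (by simp only; omega)
  simp only [] at hwsc hwsv hwl
  have etext : L.textHi = 1154368 := rfl
  -- the blocks the fields of `Common` read are kept
  have kc : (Codebook.block (e.reg .rdi).toNat).Kept u.mem v.mem :=
    kept_of_footprint hS ⟨by simp only; omega, by simp only; omega⟩ hroom htop a1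
  have ksv : (Codebook.svBlock e.mem (e.reg .rdi).toNat).Kept u.mem v.mem :=
    kept_of_footprint hS ⟨by simp only; omega, by simp only; omega⟩ hroom htop a2
  have kl : (Block.mk (e.reg .rsi).toNat (Codebook.entries e.mem (e.reg .rdi).toNat).toNat).Kept u.mem v.mem :=
    kept_of_footprint hS ⟨by simp only; omega, by simp only; omega⟩ hroom htop a3
  have hf' : Codebook.SameFields u.mem v.mem (e.reg .rdi).toNat := Codebook.SameFields.of_kept kc
  -- a stack slot at or above the spilled arguments reads the same
  have hslot : ∀ (a : Word) (x : Word), (e.reg .rsp).toNat - 88 ≤ a.toNat → a.toNat + 8 ≤ (e.reg .rsp).toNat + 8 →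
      (a.toNat + 8 ≤ (e.reg .rsp).toNat - 80 ∨ (e.reg .rsp).toNat - 76 ≤ a.toNat) →
      UInt64.ofNat (u.mem.readLE a 8) = x → UInt64.ofNat (v.mem.readLE a 8) = x := by
    intro a x h1 h2 h3 hx
    refine Mem.ofNat_readLE_frame hx (hS.eqOn _ _ ?_) (by omega)
    intro w hw
    simp only [List.mem_cons, List.not_mem_nil, or_false] at hw
    rcases hw with rfl | rfl | rfl
    · simp only []
      omega
    · simp only []
      omega
    · simp only []
      omega
  have hsv4 : 4 ≤ Codebook.sorted_values e.mem (e.reg .rdi).toNat := by omega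
  refine ⟨⟨he, hrsp, ?_, ?_, ?_, ?_, ?_, ?_, ?_, ?_, hcode, hinv, Mem.EqOn.trans hun0 hun⟩, hpre, hrbp, ?_, ?_,
    sameFields_trans hfields hf', hK1.frame hf', hK2.frame hf', k3t_frame hK3t hf', ?_, ?_, ?_, hlens.trans kl⟩
  · exact hslot _ _ (by u_omega) (by u_omega) (by u_omega) hra
  · exact hslot _ _ (by u_omega) (by u_omega) (by u_omega) h15
  · exact hslot _ _ (by u_omega) (by u_omega) (by u_omega) h14
  · exact hslot _ _ (by u_omega) (by u_omega) (by u_omega) h13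
  · exact hslot _ _ (by u_omega) (by u_omega) (by u_omega) h12
  · exact hslot _ _ (by u_omega) (by u_omega) (by u_omega) hbp
  · exact hslot _ _ (by u_omega) (by u_omega) (by u_omega) hbx
  · -- the footprint since the entry: the segment's windows lie inside the contract's
    refine hsame.step_same' hS ?_
    simp only [X86.User.Spec.footprint, vspec]
    intro w hw
    simp only [List.mem_cons, List.not_mem_nil, or_false] at hw
    rcases hw with rfl | rfl | rfl
    · refine Or.inr ⟨_, List.mem_cons_self, ?_, ?_⟩
      · simp only []
        omega
      · simp only []
        omega
    · refine Or.inr ⟨_, List.mem_cons_self, ?_, ?_⟩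
      · simp only []
        omega
      · simp only []
        omega
    · refine Or.inr ⟨(scBlock e.mem (e.reg .rdi).toNat).span, List.mem_cons_of_mem _ ?_, ?_, ?_⟩
      · unfold compute_sorted_huffman.wins
        exact List.mem_append_left _ List.mem_cons_self
      · simp only [scBlock, Block.span]
        omega
      · simp only [scBlock, Block.span]
        omega
  · exact hslot _ _ (by u_omega) (by u_omega) (by u_omega) hlengths
  · exact hslot _ _ (by u_omega) (by u_omega) (by u_omega) hvalues
  · -- K4: the struct's fields and the sentinel word `sorted_values[-1]`
    refine hK4.frame hf' ?_
    intro _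
    rw [hfields.sorted_values]
    exact ksv.i32 _ (by simp only; omega) (by simp only; omega)
  · -- ZV: the table `sorted_values[0 .. se)` is not written
    refine hzv.same ?_ (by omega)
    exact Mem.EqOn.mono ksv.same (by simp only; omega) (by simp only; omega)
  · -- VAL (sparse): the `values` block is not written
    intro hs
    obtain ⟨hvB, _⟩ := hpre.sparse hs
    have hwv := blk_where hpre.live hsh.inv hsh.offText (by omega) hvB (by simp only; omega)
    simp only [] at hwv
    have kv : (Block.mk (e.reg .rdx).toNat (4 * (Codebook.sorted_entries e.mem (e.reg .rdi).toNat).toNat)).Kept u.mem v.mem :=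
      kept_of_footprint hS ⟨by simp only; omega, by simp only; omega⟩ hroom htop (a4 hs)
    exact (hvals hs).same kv.same (by omega)

end Vorbis.Spec.compute_sorted_huffman_2
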